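-- pv_equiv track=rewrite | github.com/princeton-nlp/cocoa | craigslistbargain/data/analyze_price.py | reshape_x
-- ===== SOURCE A (Python) =====
-- def reshape_x(xx):
--     idx = []
--     for i in range(2):
--         for j in xx[i]:
--             idx.append(j)
--     idx.sort()
--     dct = {}
--     for i, j in enumerate(idx):
--         dct[j] = i
--     xxx = [[], []]
--     for i in range(2):
--         for j in xx[i]:
--             xxx[i].append(dct[j])
--     return xxx
-- ===== SOURCE B (Python) =====
-- def reshape_x(xx):
--     merged = xx[0] + xx[1]
--     def rank(j):
--         return sum(1 for y in merged if y <= j) - 1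
--     return [[rank(j) for j in xx[0]], [rank(j) for j in xx[1]]]
-- ===== Notes on version B (the rewrite author's own statement) =====
-- stated objective: alternative
-- what changed: Drops the sort and the value-to-rank dict entirely: each element's rank is computed directly as (count of merged elements <= it) - 1 by a comparison-counting scan, trading the O(n log n) sort for a sort-free O(n^2) count.
import Mathlib
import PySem

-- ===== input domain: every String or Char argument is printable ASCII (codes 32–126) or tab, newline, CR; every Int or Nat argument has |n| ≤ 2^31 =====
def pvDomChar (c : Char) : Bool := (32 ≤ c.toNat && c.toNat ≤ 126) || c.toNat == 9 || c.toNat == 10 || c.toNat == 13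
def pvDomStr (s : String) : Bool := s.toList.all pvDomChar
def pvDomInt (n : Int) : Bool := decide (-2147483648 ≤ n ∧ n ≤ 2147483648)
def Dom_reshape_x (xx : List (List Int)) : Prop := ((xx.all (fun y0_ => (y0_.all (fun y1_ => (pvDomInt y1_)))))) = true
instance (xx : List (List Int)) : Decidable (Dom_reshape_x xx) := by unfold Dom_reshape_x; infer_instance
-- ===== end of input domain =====

-- B drops A's sort and value→rank dict entirely: each element's rank is computed directly as
-- (count of merged elements ≤ it) - 1 by a comparison-counting scan (alternative; no speed claim).

-- ===== PORT A =====
def reshape_x (xx : List (List Int)) : List (List Int) :=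
  -- idx = []; for i in range(2): for j in xx[i]: idx.append(j)
  let idx : List Int := (PySem.List.pyRange 0 2 1).foldl
    (fun acc i => ((PySem.List.pyGet? xx i).getD []).foldl (fun a j => a ++ [j]) acc) []
  -- idx.sort()
  let idx := PySem.List.sorted idx (fun x => x) false
  -- dct = {}; for i, j in enumerate(idx): dct[j] = i
  let dct : PySem.Dict Int Int := (PySem.List.enumerate idx 0).foldl
    (fun d p => d.insert p.2 p.1) PySem.Dict.empty
  -- xxx = [[], []]; for i in range(2): for j in xx[i]: xxx[i].append(dct[j])
  -- dct[j] can never raise KeyError here (every j is in idx), so getD 0 is exact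
  (PySem.List.pyRange 0 2 1).foldl
    (fun (acc : List (List Int)) i =>
      ((PySem.List.pyGet? xx i).getD []).foldl
        (fun a j => a.set i.toNat ((a.getD i.toNat []) ++ [dct.getD j 0])) acc)
    [[], []]

-- ===== PORT B =====
def reshape_x_alt (xx : List (List Int)) : List (List Int) :=
  -- merged = xx[0] + xx[1]
  let merged := ((PySem.List.pyGet? xx 0).getD []) ++ ((PySem.List.pyGet? xx 1).getD [])
  -- rank(j) = sum(1 for y in merged if y <= j) - 1
  let rank := fun (j : Int) => (merged.foldl (fun (acc : Int) y => if y ≤ j then acc + 1 else acc) 0) - 1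
  [((PySem.List.pyGet? xx 0).getD []).map rank,
   ((PySem.List.pyGet? xx 1).getD []).map rank]

-- ===== PRECONDITION & SPEC =====
-- Both programs index xx[0] and xx[1]: with fewer than two sublists A (and B) raise IndexError.
def Pre_reshape_x (xx : List (List Int)) : Prop := 2 ≤ xx.length
instance (xx : List (List Int)) : Decidable (Pre_reshape_x xx) := by unfold Pre_reshape_x; infer_instance
def pvWitness_reshape_x : List (List Int) := [[3, 1, 2], [2, 1]]

def Spec_reshape_x (xx : List (List Int)) (out : List (List Int)) : Prop := out = reshape_x_alt xx
instance (xx : List (List Int)) (out : List (List Int)) : Decidable (Spec_reshape_x xx out) := by unfold Spec_reshape_x; infer_instance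

-- ===== CLAIM (what is proved, stated in full; the proofs are below) =====
def Claim_equal_reshape_x : Prop := ∀ (xx : List (List Int)), Dom_reshape_x xx → Pre_reshape_x xx → Spec_reshape_x xx (reshape_x xx)

-- ===== LEMMAS AND PROOFS =====

-- folding `insert p.2 p.1` over pairs whose second components all differ from j leaves j's entry
theorem foldl_insert_getD_of_not_mem (l : List (Int × Int)) (d : PySem.Dict Int Int) (j : Int)
    (h : ∀ p ∈ l, p.2 ≠ j) :
    (l.foldl (fun d p => d.insert p.2 p.1) d).getD j 0 = d.getD j 0 := by
  induction l generalizing d with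
  | nil => rfl
  | cons p t ih =>
    simp only [List.foldl_cons]
    rw [ih _ (fun q hq => h q (List.mem_cons_of_mem _ hq))]
    exact PySem.Dict.getD_insert_of_ne _ _ _ ((h p (List.mem_cons_self)).symm)

-- the dict built by `for i, j in enumerate(s): dct[j] = i` over a (≤)-sorted s maps j to
-- (start index) + (number of elements ≤ j) - 1
theorem dict_rank (s : List Int) (j : Int) (k : Int) (d : PySem.Dict Int Int)
    (hs : s.Pairwise (· ≤ ·)) (hj : j ∈ s) :
    ((PySem.List.enumerate s k).foldl (fun d p => d.insert p.2 p.1) d).getD j 0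
      = k + (s.countP (fun y => decide (y ≤ j)) : Int) - 1 := by
  induction s generalizing k d with
  | nil => cases hj
  | cons a t ih =>
    rw [PySem.List.enumerate_cons, List.foldl_cons]
    rcases List.pairwise_cons.mp hs with ⟨ha, ht⟩
    by_cases hjt : j ∈ t
    · rw [ih (k + 1) _ ht hjt]
      have : a ≤ j := ha j hjt
      simp only [List.countP_cons, this, decide_true]
      push_cast
      ring
    · have hja : j = a := by
        rcases List.mem_cons.mp hj with h | h
        · exact h
        · exact absurd h hjt
      subst hja
      rw [foldl_insert_getD_of_not_mem _ _ _ (by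
        intro p hp
        rcases (PySem.List.mem_enumerate_iff _ _ _).mp hp with ⟨m, hm, rfl⟩
        exact fun hc => hjt (hc ▸ List.getElem_mem hm))]
      rw [PySem.Dict.getD_insert_self]
      have hct : t.countP (fun y => decide (y ≤ j)) = 0 := by
        rw [List.countP_eq_zero]
        intro y hy
        simp only [decide_eq_true_eq]
        intro hle
        exact hjt (le_antisymm hle (ha y hy) ▸ hy)
      simp only [List.countP_cons, hct, le_refl, decide_true]
      push_cast
      ring

-- B's counting fold is countP (as an Int), offset by the accumulator
theorem foldl_count_eq_countP (l : List Int) (j : Int) (acc : Int) :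
    l.foldl (fun (acc : Int) y => if y ≤ j then acc + 1 else acc) acc
      = acc + (l.countP (fun y => decide (y ≤ j)) : Int) := by
  induction l generalizing acc with
  | nil => simp
  | cons a t ih =>
    simp only [List.foldl_cons, List.countP_cons]
    by_cases h : a ≤ j
    · simp only [h, if_pos, decide_true]
      rw [ih]
      push_cast
      ring
    · simp only [h, decide_false]
      rw [ih]
      simp
  
-- countP is invariant under permutation (sorted vs merged)
theorem countP_sorted (l : List Int) (j : Int) :
    (PySem.List.sorted l (fun x => x) false).countP (fun y => decide (y ≤ j))
      = l.countP (fun y => decide (y ≤ j)) :=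
  (PySem.List.sorted_perm l (fun x => x) false).countP_eq _

-- inner output loop of A at index 0: appends g j for each j of ys to the first slot
theorem foldl_set0 (ys l0 l1 : List Int) (g : Int → Int) :
    ys.foldl (fun (a : List (List Int)) j => a.set 0 ((a.getD 0 []) ++ [g j])) [l0, l1]
      = [l0 ++ ys.map g, l1] := by
  induction ys generalizing l0 with
  | nil => simp
  | cons y t ih =>
    simp only [List.foldl_cons, List.map_cons]
    rw [show ([l0, l1].set 0 ((([l0, l1].getD 0 []) ++ [g y]))) = [l0 ++ [g y], l1] by simp,
        ih (l0 ++ [g y])]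
    simp

-- inner output loop of A at index 1
theorem foldl_set1 (ys l0 l1 : List Int) (g : Int → Int) :
    ys.foldl (fun (a : List (List Int)) j => a.set 1 ((a.getD 1 []) ++ [g j])) [l0, l1]
      = [l0, l1 ++ ys.map g] := by
  induction ys generalizing l1 with
  | nil => simp
  | cons y t ih =>
    simp only [List.foldl_cons, List.map_cons]
    rw [show ([l0, l1].set 1 ((([l0, l1].getD 1 []) ++ [g y]))) = [l0, l1 ++ [g y]] by simp,
        ih (l1 ++ [g y])]
    simp

-- ===== VERDICT (by name: the statement is the Claim_ definition above) =====
theorem reshape_x_spec : Claim_equal_reshape_x := by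
  intro xx _ hpre
  unfold Spec_reshape_x reshape_x reshape_x_alt
  match xx, hpre with
  | x0 :: x1 :: rest, _ =>
    have hget0 : (PySem.List.pyGet? (x0 :: x1 :: rest) 0).getD [] = x0 := by
      simp [PySem.List.pyGet?, PySem.List.pyIdx?]
      rw [if_pos (by positivity)]
      simp
    have hget1 : (PySem.List.pyGet? (x0 :: x1 :: rest) 1).getD [] = x1 := by
      simp [PySem.List.pyGet?, PySem.List.pyIdx?]
    have hrange : PySem.List.pyRange 0 2 1 = [0, 1] := rfl
    simp only [hrange, List.foldl_cons, List.foldl_nil, hget0, hget1,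
      PySem.List.foldl_append_singleton]
    simp only [List.nil_append]
    set s := PySem.List.sorted (x0 ++ x1) (fun x => x) false with hs
    have hpw : s.Pairwise (· ≤ ·) := PySem.List.sorted_pairwise (x0 ++ x1) (fun x => x)
    set dct := (PySem.List.enumerate s 0).foldl (fun d p => d.insert p.2 p.1) PySem.Dict.empty
      with hdct
    have hrank : ∀ j ∈ x0 ++ x1, dct.getD j 0
        = ((x0 ++ x1).foldl (fun (acc : Int) y => if y ≤ j then acc + 1 else acc) 0) - 1 := by
      intro j hj
      have hjs : j ∈ s := (PySem.List.mem_sorted _ _ _ _).mpr hj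
      rw [hdct, dict_rank s j 0 _ hpw hjs, hs, countP_sorted, foldl_count_eq_countP]
    rw [show ((0 : Int).toNat) = 0 from rfl, show ((1 : Int).toNat) = 1 from rfl] at *
    rw [foldl_set0 x0 [] [] (fun j => dct.getD j 0)]
    simp only [List.nil_append]
    rw [foldl_set1 x1 (x0.map (fun j => dct.getD j 0)) [] (fun j => dct.getD j 0)]
    simp only [List.nil_append]
    congr 1
    · exact List.map_congr_left (fun j hj => hrank j (List.mem_append_left _ hj))
    · congr 1
      exact List.map_congr_left (fun j hj => hrank j (List.mem_append_right _ hj))
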